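-- pv_equiv track=rewrite | github.com/yunchan312/Algorithm-Study | 3-1학기중스터디/17145.py | eatShark
-- ===== SOURCE A (Python) =====
-- from collections import deque
--
-- def eatShark(sharks): #return sharks
--     eatens = deque()
--     for i in range(len(sharks)-1):
--         for j in range(i+1,len(sharks)):
--             if sharks[i][0] == sharks[j][0] and sharks[i][1] == sharks[j][1]:
--                 if sharks[i][4] > sharks[j][4]:
--                     eatens.append(sharks[j])
--                 else:
--                     eatens.append(sharks[i])
--                 break
--
--     for eaten in eatens:
--         sharks.remove(eaten)
--     return sharks
-- ===== SOURCE B (Python) =====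
-- # Single pass with a dict keyed by position: pair each shark with the pending one
-- # at its position, drop the loser, then rebuild the survivors in order.
-- # (A mutates `sharks` in place and returns it; B returns a new list — the
-- # equivalence claimed is about the return value only.)
-- def eatShark(sharks):
--     pending = {}
--     removed = set()
--     for idx, s in enumerate(sharks):
--         k = (s[0], s[1])
--         if k in pending:
--             pidx, ps = pending[k]
--             if ps[4] > s[4]:
--                 loser, winner = idx, (pidx, ps)
--             else:
--                 loser, winner = pidx, (idx, s)
--             removed.add(loser)
--             pending[k] = winner
--         else:
--             pending[k] = (idx, s)
--     return [s for idx, s in enumerate(sharks) if idx not in removed]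
-- ===== Notes on version B (the rewrite author's own statement) =====
-- stated objective: faster
-- what changed: replaced the quadratic nested index scan plus repeated list.remove passes by a single pass that pairs each shark with the pending shark at its position via a dict and collects loser indices in a set, then one rebuild pass
-- outside the precondition, e.g. on eatShark([[1]]): A returns [[1]], B raises IndexError
import Mathlib
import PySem

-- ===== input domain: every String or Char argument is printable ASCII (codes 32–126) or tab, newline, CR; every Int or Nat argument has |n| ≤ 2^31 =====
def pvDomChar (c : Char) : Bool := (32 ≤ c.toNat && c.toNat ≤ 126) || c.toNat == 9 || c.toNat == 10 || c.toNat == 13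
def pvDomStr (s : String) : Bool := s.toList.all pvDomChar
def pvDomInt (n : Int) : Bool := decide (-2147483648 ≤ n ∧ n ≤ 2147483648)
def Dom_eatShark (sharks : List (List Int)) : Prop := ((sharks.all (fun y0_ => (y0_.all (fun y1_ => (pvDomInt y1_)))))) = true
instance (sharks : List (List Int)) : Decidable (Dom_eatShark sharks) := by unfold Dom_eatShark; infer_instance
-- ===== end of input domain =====

-- B replaces A's quadratic nested index scan plus list.remove passes by a single pass with a
-- position-keyed dict and a removed-index set, then one rebuild pass (return value only:
-- Python A mutates `sharks` in place and returns it, Python B builds a new list).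

-- ===== PORT A =====
-- sharks[i] / s[k]: pyGetD is exact under Pre_ (all indices read there are in range)
def pvGetS (sharks : List (List Int)) (i : Int) : List Int := PySem.List.pyGetD sharks i []
def pvGetI (s : List Int) (k : Int) : Int := PySem.List.pyGetD s k 0

-- inner `for j in range(i+1, len(sharks)): if …: …; break`
def pvFindEaten (sharks : List (List Int)) (i : Int) : List Int → Option (List Int)
  | [] => none
  | j :: js =>
      if pvGetI (pvGetS sharks i) 0 = pvGetI (pvGetS sharks j) 0 ∧
         pvGetI (pvGetS sharks i) 1 = pvGetI (pvGetS sharks j) 1 then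
        some (if pvGetI (pvGetS sharks i) 4 > pvGetI (pvGetS sharks j) 4
              then pvGetS sharks j else pvGetS sharks i)
      else pvFindEaten sharks i js

def eatShark (sharks : List (List Int)) : List (List Int) :=
  let eatens : List (List Int) :=
    (PySem.List.pyRange 0 ((sharks.length : Int) - 1) 1).foldl
      (fun eatens i =>
        match pvFindEaten sharks i (PySem.List.pyRange (i + 1) (sharks.length : Int) 1) with
        | some e => eatens ++ [e]
        | none => eatens) []
  -- `sharks.remove(eaten)`: remove? returns none on ValueError, excluded by Pre_
  eatens.foldl (fun cur e => (PySem.List.remove? cur e).getD cur) sharks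

-- ===== PORT B =====
-- loop body of Source B: pair the new shark with the pending one at its position key
def pvStepB (st : PySem.Dict (Int × Int) (Int × List Int) × PySem.Set Int) (p : Int × List Int) :
    PySem.Dict (Int × Int) (Int × List Int) × PySem.Set Int :=
  let k := (pvGetI p.2 0, pvGetI p.2 1)
  match PySem.Dict.get? st.1 k with
  | some pv =>
      if pvGetI pv.2 4 > pvGetI p.2 4 then
        (PySem.Dict.insert st.1 k pv, PySem.Set.add st.2 p.1)
      else
        (PySem.Dict.insert st.1 k (p.1, p.2), PySem.Set.add st.2 pv.1)
  | none => (PySem.Dict.insert st.1 k (p.1, p.2), st.2)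

def eatShark_alt (sharks : List (List Int)) : List (List Int) :=
  let st := (PySem.List.enumerate sharks 0).foldl pvStepB (PySem.Dict.empty, PySem.Set.empty)
  ((PySem.List.enumerate sharks 0).filter (fun p => ! PySem.Set.contains st.2 p.1)).map (·.2)

-- ===== PRECONDITION & SPEC =====
def pvKey (s : List Int) : Int × Int := (PySem.List.pyGetD s 0 0, PySem.List.pyGetD s 1 0)

-- Pre_ excludes (a) sharks shorter than 2 entries (and shorter than 5 when their position
-- repeats): there A raises IndexError whenever it actually compares or eats them, while on the
-- never-compared ones A returns but B's unconditional s[0]/s[1] reads raise; and (b) positions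
-- occurring three or more times, where A's chained pairing can remove the same shark twice
-- (ValueError) and is accidental where it happens to return.
def Pre_eatShark (sharks : List (List Int)) : Prop :=
  ∀ s ∈ sharks, 2 ≤ s.length ∧
    (2 ≤ sharks.countP (fun t => decide (pvKey t = pvKey s)) → 5 ≤ s.length) ∧
    sharks.countP (fun t => decide (pvKey t = pvKey s)) ≤ 2

instance (sharks : List (List Int)) : Decidable (Pre_eatShark sharks) := by
  unfold Pre_eatShark; infer_instance

def pvWitness_eatShark : List (List Int) := [[0, 0, 0, 0, 1], [0, 0, 0, 0, 2]]

def Spec_eatShark (sharks : List (List Int)) (out : List (List Int)) : Prop := out = eatShark_alt sharks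
instance (sharks : List (List Int)) (out : List (List Int)) : Decidable (Spec_eatShark sharks out) := by unfold Spec_eatShark; infer_instance

-- ===== CLAIM (what is proved, stated in full; the proofs are below) =====
def Claim_equal_eatShark : Prop := ∀ (sharks : List (List Int)), Dom_eatShark sharks → Pre_eatShark sharks → Spec_eatShark sharks (eatShark sharks)

-- ===== LEMMAS AND PROOFS =====

-- shared index-level vocabulary: key, size, first later index with the same key,
-- the loser of a pair, all loser indices, and "the survivors of `sharks` under R"
def pvKOf (sharks : List (List Int)) (i : Int) : Int × Int := pvKey (pvGetS sharks i)
def pvSzOf (sharks : List (List Int)) (i : Int) : Int := pvGetI (pvGetS sharks i) 4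
def pvNext (sharks : List (List Int)) (i : Int) : Option Int :=
  (PySem.List.pyRange (i + 1) (sharks.length : Int) 1).find?
    (fun j => decide (pvKOf sharks j = pvKOf sharks i))
def pvLoser (sharks : List (List Int)) (i j : Int) : Int :=
  if pvSzOf sharks i > pvSzOf sharks j then j else i
def pvLosers (sharks : List (List Int)) : List Int :=
  (PySem.List.pyRange 0 (sharks.length : Int) 1).filterMap
    (fun i => (pvNext sharks i).map (pvLoser sharks i))
def pvResFilter (sharks : List (List Int)) (R : Int → Bool) : List (List Int) :=
  ((PySem.List.enumerate sharks 0).filter (fun p => ! R p.1)).map (·.2)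

theorem pv_three_le_length {l : List Int} {a b c : Int}
    (ha : a ∈ l) (hb : b ∈ l) (hc : c ∈ l) (hab : a ≠ b) (hac : a ≠ c) (hbc : b ≠ c) :
    3 ≤ l.length := by
  have hsub : ({a, b, c} : Finset Int) ⊆ l.toFinset := by
    intro x hx
    simp only [Finset.mem_insert, Finset.mem_singleton] at hx
    rcases hx with rfl | rfl | rfl <;> simp [ha, hb, hc]
  have hcard : ({a, b, c} : Finset Int).card = 3 := by
    rw [Finset.card_eq_three]; exact ⟨a, b, c, hab, hac, hbc, rfl⟩
  calc 3 = ({a, b, c} : Finset Int).card := hcard.symm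
    _ ≤ l.toFinset.card := Finset.card_le_card hsub
    _ ≤ l.length := l.toFinset_card_le

theorem pv_find?_sorted_iff {p : Int → Bool} {l : List Int} (hpw : l.Pairwise (· < ·)) {a : Int} :
    l.find? p = some a ↔ a ∈ l ∧ p a = true ∧ ∀ b ∈ l, b < a → p b = false := by
  induction l with
  | nil => simp
  | cons x t ih =>
    rcases List.pairwise_cons.mp hpw with ⟨hx, hpt⟩
    by_cases hpx : p x = true
    · rw [List.find?_cons_of_pos hpx]
      constructor
      · rintro h
        have : x = a := by simpa using h
        subst this
        refine ⟨List.mem_cons_self, hpx, ?_⟩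
        rintro b hb hba
        rcases List.mem_cons.mp hb with rfl | hbt
        · exact absurd hba (lt_irrefl _)
        · exact absurd hba (not_lt.mpr (le_of_lt (hx b hbt)))
      · rintro ⟨hmem, hpa, hmin⟩
        rcases List.mem_cons.mp hmem with rfl | hat
        · rfl
        · have := hmin x List.mem_cons_self (hx a hat)
          rw [this] at hpx; exact absurd hpx (by simp)
    · rw [List.find?_cons_of_neg hpx]
      rw [ih hpt]
      constructor
      · rintro ⟨hat, hpa, hmin⟩
        refine ⟨List.mem_cons_of_mem _ hat, hpa, ?_⟩
        rintro b hb hba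
        rcases List.mem_cons.mp hb with rfl | hbt
        · simpa using hpx
        · exact hmin b hbt hba
      · rintro ⟨hmem, hpa, hmin⟩
        rcases List.mem_cons.mp hmem with rfl | hat
        · exact absurd hpa hpx
        · exact ⟨hat, hpa, fun b hb hba => hmin b (List.mem_cons_of_mem _ hb) hba⟩

theorem pvNext_eq_some_iff {sharks : List (List Int)} {i j : Int} :
    pvNext sharks i = some j ↔
      i < j ∧ j < (sharks.length : Int) ∧ pvKOf sharks j = pvKOf sharks i ∧
        ∀ t, i < t → t < j → pvKOf sharks t ≠ pvKOf sharks i := by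
  unfold pvNext
  rw [pv_find?_sorted_iff (PySem.List.pairwise_lt_pyRange_one _ _)]
  simp only [PySem.List.mem_pyRange_one, decide_eq_true_eq, decide_eq_false_iff_not]
  constructor
  · rintro ⟨⟨h1, h2⟩, hk, hmin⟩
    exact ⟨by omega, h2, hk, fun t ht1 ht2 => hmin t ⟨by omega, by omega⟩ ht2⟩
  · rintro ⟨h1, h2, hk, hmin⟩
    exact ⟨⟨by omega, h2⟩, hk, fun b hb hba => hmin b (by omega) hba⟩

theorem pv_no_triple {sharks : List (List Int)} (hpre : Pre_eatShark sharks)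
    {a b c : Int} (ha0 : 0 ≤ a) (ha : a < (sharks.length : Int))
    (hb0 : 0 ≤ b) (hb : b < (sharks.length : Int))
    (hc0 : 0 ≤ c) (hc : c < (sharks.length : Int))
    (hab : a ≠ b) (hac : a ≠ c) (hbc : b ≠ c)
    (kab : pvKOf sharks b = pvKOf sharks a) (kac : pvKOf sharks c = pvKOf sharks a) :
    False := by
  have hmemA : pvGetS sharks a ∈ sharks := by
    apply PySem.List.pyGetD_mem; unfold PySem.Raise.InRange; omega
  obtain ⟨-, -, hcount⟩ := hpre _ hmemA
  have hrw : ∀ pr : List Int → Bool, sharks.countP pr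
      = ((PySem.List.pyRange 0 (sharks.length : Int) 1).filter
          (fun j => pr (pvGetS sharks j))).length := by
    intro pr
    conv_lhs => rw [← PySem.List.map_pyGetD_pyRange_zero' sharks []]
    rw [List.countP_map, List.countP_eq_length_filter]
    rfl
  have hmemf : ∀ x : Int, 0 ≤ x → x < (sharks.length : Int) → pvKOf sharks x = pvKOf sharks a →
      x ∈ (PySem.List.pyRange 0 (sharks.length : Int) 1).filter
          (fun j => decide (pvKey (pvGetS sharks j) = pvKey (pvGetS sharks a))) := by
    intro x hx0 hx hkx
    rw [List.mem_filter]
    refine ⟨(PySem.List.mem_pyRange_one).mpr ⟨hx0, hx⟩, ?_⟩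
    simp only [decide_eq_true_eq]
    exact hkx
  have h3 := pv_three_le_length (hmemf a ha0 ha rfl) (hmemf b hb0 hb kab) (hmemf c hc0 hc kac) hab hac hbc
  rw [hrw (fun t => decide (pvKey t = pvKey (pvGetS sharks a)))] at hcount
  omega

theorem pv_pairs_disjoint {sharks : List (List Int)} (hpre : Pre_eatShark sharks)
    {i i' j j' : Int} (hi0 : 0 ≤ i) (hi0' : 0 ≤ i')
    (hij : pvNext sharks i = some j) (hij' : pvNext sharks i' = some j')
    (hne : i ≠ i') (hkey : pvKOf sharks i' = pvKOf sharks i) : False := by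
  obtain ⟨h1, h2, hk, -⟩ := pvNext_eq_some_iff.mp hij
  obtain ⟨h1', h2', hk', -⟩ := pvNext_eq_some_iff.mp hij'
  rcases Ne.lt_or_gt hne with hlt | hgt
  · by_cases hji' : j = i'
    · subst hji'
      exact pv_no_triple hpre hi0 (by omega) hi0' (by omega) (by omega) h2'
        hne (by omega) (by omega) hkey (hk'.trans hkey)
    · exact pv_no_triple hpre hi0 (by omega) hi0' (by omega) (by omega) h2
        hne (by omega) (fun h => hji' h.symm) hkey hk
  · by_cases hij2 : j' = i
    · subst hij2
      exact pv_no_triple hpre hi0' (by omega) hi0 (by omega) (by omega) h2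
        (Ne.symm hne) (by omega) (by omega) hkey.symm (hk.trans hkey.symm)
    · exact pv_no_triple hpre hi0' (by omega) hi0 (by omega) (by omega) h2'
        (Ne.symm hne) (by omega) (fun h => hij2 h.symm) hkey.symm hk'

theorem pv_same_next {sharks : List (List Int)} (hpre : Pre_eatShark sharks)
    {i w j : Int} (hi0 : 0 ≤ i) (hw0 : 0 ≤ w)
    (h1 : pvNext sharks i = some j) (h2 : pvNext sharks w = some j) : i = w := by
  by_contra hne
  have hk1 := (pvNext_eq_some_iff.mp h1).2.2.1
  have hk2 := (pvNext_eq_some_iff.mp h2).2.2.1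
  exact pv_pairs_disjoint hpre hi0 hw0 h1 h2 hne (hk2.symm.trans hk1)

theorem pv_kOf_loser {sharks : List (List Int)} {i j : Int}
    (hij : pvNext sharks i = some j) :
    pvKOf sharks (pvLoser sharks i j) = pvKOf sharks i := by
  obtain ⟨-, -, hk, -⟩ := pvNext_eq_some_iff.mp hij
  unfold pvLoser
  split_ifs <;> [exact hk; rfl]

theorem pv_mem_losers {sharks : List (List Int)} {x : Int} :
    x ∈ pvLosers sharks ↔
      ∃ i j : Int, 0 ≤ i ∧ pvNext sharks i = some j ∧ pvLoser sharks i j = x := by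
  unfold pvLosers
  rw [List.mem_filterMap]
  constructor
  · rintro ⟨i, hi, hfx⟩
    rw [Option.map_eq_some_iff] at hfx
    obtain ⟨j, hj, rfl⟩ := hfx
    exact ⟨i, j, ((PySem.List.mem_pyRange_one).mp hi).1, hj, rfl⟩
  · rintro ⟨i, j, hi0, hij, rfl⟩
    obtain ⟨h1, h2, -, -⟩ := pvNext_eq_some_iff.mp hij
    exact ⟨i, (PySem.List.mem_pyRange_one).mpr ⟨hi0, by omega⟩,
      by rw [Option.map_eq_some_iff]; exact ⟨j, hij, rfl⟩⟩

theorem pv_losers_nodup {sharks : List (List Int)} (hpre : Pre_eatShark sharks) :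
    (pvLosers sharks).Nodup := by
  unfold pvLosers List.Nodup
  rw [List.pairwise_filterMap]
  have base := PySem.List.pairwise_lt_pyRange_one 0 (sharks.length : Int)
  refine List.Pairwise.imp_of_mem ?_ base
  intro a a' ha ha' hlt b hb b' hb' hbb'
  rw [Option.map_eq_some_iff] at hb hb'
  obtain ⟨j, hj, rfl⟩ := hb
  obtain ⟨j', hj', rfl⟩ := hb'
  have ha0 : 0 ≤ a := ((PySem.List.mem_pyRange_one).mp ha).1
  have ha0' : 0 ≤ a' := ((PySem.List.mem_pyRange_one).mp ha').1
  have hkey : pvKOf sharks a' = pvKOf sharks a := by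
    rw [← pv_kOf_loser hj', ← pv_kOf_loser hj, hbb']
  exact pv_pairs_disjoint hpre ha0 ha0' hj hj' (by omega) hkey

theorem pv_sz_congr {sharks : List (List Int)} {m l : Int}
    (h : pvGetS sharks m = pvGetS sharks l) : pvSzOf sharks m = pvSzOf sharks l := by
  unfold pvSzOf; rw [h]

theorem pv_firstOcc {sharks : List (List Int)} (hpre : Pre_eatShark sharks)
    {i j : Int} (hi0 : 0 ≤ i) (hij : pvNext sharks i = some j) :
    ∀ m : Int, 0 ≤ m → m < pvLoser sharks i j →
      pvGetS sharks m ≠ pvGetS sharks (pvLoser sharks i j) := by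
  obtain ⟨h1, h2, hk, hmin⟩ := pvNext_eq_some_iff.mp hij
  intro m hm0 hml heq
  have hkm : pvKOf sharks m = pvKOf sharks (pvLoser sharks i j) := by
    unfold pvKOf; rw [heq]
  rw [pv_kOf_loser hij] at hkm
  unfold pvLoser at hml heq
  by_cases hsz : pvSzOf sharks i > pvSzOf sharks j
  · rw [if_pos hsz] at hml heq
    by_cases hmi : m = i
    · subst hmi
      have := pv_sz_congr heq
      omega
    · exact pv_no_triple hpre hi0 (by omega) hm0 (by omega) (by omega) h2
        (fun h => hmi h.symm) (by omega) (by omega) hkm hk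
  · rw [if_neg hsz] at hml heq
    exact pv_no_triple hpre hi0 (by omega) hm0 (by omega) (by omega) h2
      (by omega) (by omega) (by omega) hkm hk

-- ===== A reduces to: remove the loser values, in pair order =====

theorem pv_findEaten_eq (sharks : List (List Int)) (i : Int) (js : List Int) :
    pvFindEaten sharks i js
      = (js.find? (fun j => decide (pvKOf sharks j = pvKOf sharks i))).map
          (fun j => pvGetS sharks (pvLoser sharks i j)) := by
  induction js with
  | nil => rfl
  | cons j t ih =>
    by_cases hk : pvKOf sharks j = pvKOf sharks i
    · have hc : pvGetI (pvGetS sharks i) 0 = pvGetI (pvGetS sharks j) 0 ∧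
          pvGetI (pvGetS sharks i) 1 = pvGetI (pvGetS sharks j) 1 := by
        have := Prod.ext_iff.mp hk
        exact ⟨this.1.symm, this.2.symm⟩
      rw [pvFindEaten, if_pos hc, List.find?_cons_of_pos (by simpa using hk)]
      simp only [Option.map_some]
      congr 1
      unfold pvLoser pvSzOf
      split_ifs with h <;> rfl
    · have hc : ¬ (pvGetI (pvGetS sharks i) 0 = pvGetI (pvGetS sharks j) 0 ∧
          pvGetI (pvGetS sharks i) 1 = pvGetI (pvGetS sharks j) 1) := by
        intro h; exact hk (Prod.ext h.1.symm h.2.symm)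
      rw [pvFindEaten, if_neg hc, List.find?_cons_of_neg (by simpa using hk)]
      exact ih

theorem pv_findEaten_pyRange (sharks : List (List Int)) (i : Int) :
    pvFindEaten sharks i (PySem.List.pyRange (i + 1) (sharks.length : Int) 1)
      = (pvNext sharks i).map (fun j => pvGetS sharks (pvLoser sharks i j)) := by
  rw [pv_findEaten_eq]; rfl

theorem pv_eatens_fold (sharks : List (List Int)) (l : List Int) (acc : List (List Int)) :
    l.foldl (fun eatens i =>
        match pvFindEaten sharks i (PySem.List.pyRange (i + 1) (sharks.length : Int) 1) with
        | some e => eatens ++ [e]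
        | none => eatens) acc
      = acc ++ l.filterMap (fun i => (pvNext sharks i).map
          (fun j => pvGetS sharks (pvLoser sharks i j))) := by
  induction l generalizing acc with
  | nil => simp
  | cons x t ih =>
    rw [List.foldl_cons, pv_findEaten_pyRange, List.filterMap_cons]
    cases hx : pvNext sharks x with
    | none => simp only [Option.map_none]; rw [ih]
    | some j => simp only [Option.map_some]; rw [ih]; simp

theorem pv_eatens_eq (sharks : List (List Int)) :
    (PySem.List.pyRange 0 ((sharks.length : Int) - 1) 1).foldl
      (fun eatens i =>
        match pvFindEaten sharks i (PySem.List.pyRange (i + 1) (sharks.length : Int) 1) with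
        | some e => eatens ++ [e]
        | none => eatens) []
      = (pvLosers sharks).map (pvGetS sharks) := by
  rw [pv_eatens_fold, List.nil_append]
  have hmap : (pvLosers sharks).map (pvGetS sharks)
      = (PySem.List.pyRange 0 (sharks.length : Int) 1).filterMap
          (fun i => (pvNext sharks i).map (fun j => pvGetS sharks (pvLoser sharks i j))) := by
    unfold pvLosers
    rw [List.map_filterMap]
    simp only [Option.map_map]
    rfl
  rw [hmap]
  rcases Nat.eq_zero_or_pos sharks.length with h0 | hpos
  · rw [h0]; norm_num
  · have hsplit : (sharks.length : Int) = ((sharks.length : Int) - 1) + 1 := by omega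
    have hnone : pvNext sharks ((sharks.length : Int) - 1) = none := by
      unfold pvNext
      rw [show ((sharks.length : Int) - 1) + 1 = (sharks.length : Int) by omega]
      rw [PySem.List.pyRange_one_eq_nil (by omega)]
      rfl
    conv_rhs => rw [hsplit, PySem.List.pyRange_one_succ_right (by omega)]
    rw [List.filterMap_append]
    simp [hnone]

theorem pv_remove_filtered (q : List (Int × List Int)) (l : Int) (v : List Int)
    (hpw : q.Pairwise (fun p r => p.1 < r.1)) (hmem : (l, v) ∈ q)
    (hfirst : ∀ p ∈ q, p.1 < l → p.2 ≠ v) :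
    PySem.List.remove? (q.map (·.2)) v
      = some ((q.filter (fun p => p.1 ≠ l)).map (·.2)) := by
  induction q with
  | nil => exact absurd hmem (List.not_mem_nil)
  | cons a t ih =>
    rcases List.pairwise_cons.mp hpw with ⟨hrel, hpt⟩
    rcases List.mem_cons.mp hmem with heq | hmem'
    · obtain ⟨a1, a2⟩ := a
      injection heq with h1 h2
      subst h1; subst h2
      rw [List.map_cons, PySem.List.remove?_cons_self]
      have hkeep : t.filter (fun p => !decide (p.1 = l)) = t := by
        apply List.filter_eq_self.mpr
        intro p hp
        have := hrel p hp
        simp only at this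
        simp only [Bool.not_eq_eq_eq_not, Bool.not_true, decide_eq_false_iff_not]
        omega
      rw [List.filter_cons]
      simp [hkeep]
    · have hal : a.1 < l := hrel _ hmem'
      have hav : a.2 ≠ v := hfirst a List.mem_cons_self hal
      rw [List.map_cons, PySem.List.remove?_cons_of_ne _ hav,
          ih hpt hmem' (fun p hp hpl => hfirst p (List.mem_cons_of_mem _ hp) hpl)]
      rw [List.filter_cons]
      simp only [ne_eq, decide_not, Option.map_some]
      have : a.1 ≠ l := by omega
      simp [this]

theorem pv_resFilter_false (sharks : List (List Int)) :
    pvResFilter sharks (fun _ => false) = sharks := by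
  unfold pvResFilter
  simp [PySem.List.map_snd_enumerate]

theorem pv_rem_fold (sharks : List (List Int)) (P : List Int) (R : Int → Bool)
    (hnd : P.Nodup)
    (hP : ∀ l ∈ P, R l = false ∧ 0 ≤ l ∧ l < (sharks.length : Int) ∧
        ∀ m : Int, 0 ≤ m → m < l → pvGetS sharks m ≠ pvGetS sharks l) :
    P.foldl (fun cur l => (PySem.List.remove? cur (pvGetS sharks l)).getD cur)
        (pvResFilter sharks R)
      = pvResFilter sharks (fun x => R x || P.contains x) := by
  induction P generalizing R with
  | nil =>
    simp only [List.foldl_nil]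
    congr 1
    funext x
    simp
  | cons l P' ih =>
    obtain ⟨hRl, hl0, hllen, hfirst⟩ := hP l List.mem_cons_self
    have hmemq : (l, pvGetS sharks l) ∈
        (PySem.List.enumerate sharks 0).filter (fun p => ! R p.1) := by
      rw [List.mem_filter]
      constructor
      · rw [PySem.List.mem_enumerate_iff]
        refine ⟨l.toNat, by omega, ?_⟩
        rw [Prod.mk.injEq]
        unfold pvGetS
        rw [PySem.List.pyGetD_eq_getElem sharks [] hl0 hllen]
        exact ⟨by omega, rfl⟩
      · simp [hRl]
    have hstep := pv_remove_filtered
      ((PySem.List.enumerate sharks 0).filter (fun p => ! R p.1)) l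
      (pvGetS sharks l)
      ((PySem.List.pairwise_lt_enumerate sharks 0).filter _)
      hmemq
      (by
        intro p hp hpl
        rw [List.mem_filter] at hp
        rw [PySem.List.mem_enumerate_iff] at *
        obtain ⟨k, hk, rfl⟩ := hp.1
        simp only [zero_add] at *
        have : pvGetS sharks (k : Int) = sharks[(k : Int).toNat] := by
          unfold pvGetS
          exact PySem.List.pyGetD_eq_getElem sharks [] (by omega) (by simpa using hk)
        simp only [Int.toNat_natCast] at this
        rw [← this]
        exact hfirst _ (by omega) hpl)
    simp only [List.foldl_cons]
    rw [show pvResFilter sharks R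
        = ((PySem.List.enumerate sharks 0).filter (fun p => ! R p.1)).map (·.2) from rfl,
      hstep]
    simp only [Option.getD_some]
    have hmerge : (((PySem.List.enumerate sharks 0).filter (fun p => ! R p.1)).filter
          (fun p => p.1 ≠ l)).map (·.2)
        = pvResFilter sharks (fun x => R x || x == l) := by
      unfold pvResFilter
      rw [List.filter_filter]
      congr 1
      apply List.filter_congr
      intro p _
      by_cases hpe : p.1 = l
      · simp [hpe, hRl]
      · simp [hpe]
    rw [hmerge, ih (fun x => R x || x == l)
      (List.nodup_cons.mp hnd).2
      (by
        intro l' hl'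
        obtain ⟨hR', h0', hlen', hf'⟩ := hP l' (List.mem_cons_of_mem _ hl')
        refine ⟨?_, h0', hlen', hf'⟩
        have hne : l' ≠ l := by
          intro h; exact (List.nodup_cons.mp hnd).1 (h ▸ hl')
        simp [hR', hne])]
    congr 1
    funext x
    rw [List.contains_cons]
    cases R x <;> simp

theorem pv_A_eq {sharks : List (List Int)} (hpre : Pre_eatShark sharks) :
    eatShark sharks = pvResFilter sharks (fun x => (pvLosers sharks).contains x) := by
  show ((PySem.List.pyRange 0 ((sharks.length : Int) - 1) 1).foldl
      (fun eatens i =>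
        match pvFindEaten sharks i (PySem.List.pyRange (i + 1) (sharks.length : Int) 1) with
        | some e => eatens ++ [e]
        | none => eatens) []).foldl
      (fun cur e => (PySem.List.remove? cur e).getD cur) sharks = _
  rw [pv_eatens_eq, List.foldl_map]
  have hP : ∀ l ∈ pvLosers sharks, (fun _ : Int => false) l = false ∧ 0 ≤ l ∧
      l < (sharks.length : Int) ∧
      ∀ m : Int, 0 ≤ m → m < l → pvGetS sharks m ≠ pvGetS sharks l := by
    intro l hl
    obtain ⟨i, j, hi0, hij, rfl⟩ := pv_mem_losers.mp hl
    obtain ⟨h1, h2, -, -⟩ := pvNext_eq_some_iff.mp hij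
    refine ⟨rfl, ?_, ?_, pv_firstOcc hpre hi0 hij⟩
    · unfold pvLoser; split_ifs <;> omega
    · unfold pvLoser; split_ifs <;> omega
  have h := pv_rem_fold sharks (pvLosers sharks) (fun _ => false) (pv_losers_nodup hpre) hP
  rw [pv_resFilter_false] at h
  rw [h]
  congr 1

-- ===== B maintains: pending = open position, removed = closed losers =====

def pvInv (sharks : List (List Int)) (m : Nat)
    (st : PySem.Dict (Int × Int) (Int × List Int) × PySem.Set Int) : Prop :=
  (∀ K : Int × Int, st.1.get? K = none ↔
      ∀ k : Int, 0 ≤ k → k < (m : Int) → pvKOf sharks k ≠ K) ∧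
  (∀ (K : Int × Int) (w : Int) (v : List Int), st.1.get? K = some (w, v) →
      0 ≤ w ∧ w < (m : Int) ∧ pvKOf sharks w = K ∧ v = pvGetS sharks w) ∧
  (∀ x : Int, st.2.contains x = true ↔
      ∃ i j : Int, 0 ≤ i ∧ pvNext sharks i = some j ∧ j < (m : Int) ∧ pvLoser sharks i j = x)

theorem pv_inv_zero (sharks : List (List Int)) :
    pvInv sharks 0 (PySem.Dict.empty, PySem.Set.empty) := by
  refine ⟨?_, ?_, ?_⟩
  · intro K
    constructor
    · exact fun _ k hk0 hk => absurd hk (by omega)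
    · exact fun _ => PySem.Dict.get?_empty K
  · intro K w v h
    rw [PySem.Dict.get?_empty] at h
    exact absurd h (by simp)
  · intro x
    constructor
    · intro h
      rw [PySem.Set.contains_iff] at h
      exact absurd h (by simp [PySem.Set.empty])
    · rintro ⟨i, j, hi0, hij, hj, -⟩
      have := (pvNext_eq_some_iff.mp hij).1
      omega

theorem pv_inv_step {sharks : List (List Int)} (hpre : Pre_eatShark sharks)
    {m : Nat} (hm : m < sharks.length)
    {st : PySem.Dict (Int × Int) (Int × List Int) × PySem.Set Int}
    (hinv : pvInv sharks m st) :
    pvInv sharks (m + 1) (pvStepB st ((m : Int), sharks[m])) := by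
  obtain ⟨inv1, inv2, inv3⟩ := hinv
  have hGS : pvGetS sharks ((m : Nat) : Int) = sharks[m] := by
    unfold pvGetS
    rw [PySem.List.pyGetD_natCast]
    exact List.getD_eq_getElem _ _ hm
  have hKm : pvKOf sharks (m : Int) = pvKey sharks[m] := by
    unfold pvKOf; rw [hGS]
  have hk0 : (pvGetI (((m : Int), sharks[m]) : Int × List Int).2 0,
      pvGetI (((m : Int), sharks[m]) : Int × List Int).2 1) = pvKOf sharks (m : Int) := by
    rw [hKm]; rfl
  unfold pvStepB
  simp only [hk0]
  have hnopair_of_none : PySem.Dict.get? st.1 (pvKOf sharks (m : Int)) = none →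
      ∀ i : Int, 0 ≤ i → pvNext sharks i = some ((m : Nat) : Int) → False := by
    intro hnone i hi0 hnext
    obtain ⟨h1, h2, hk, -⟩ := pvNext_eq_some_iff.mp hnext
    exact ((inv1 _).mp hnone i hi0 (by omega)) hk.symm
  cases hget : PySem.Dict.get? st.1 (pvKOf sharks (m : Int)) with
  | none =>
    refine ⟨?_, ?_, ?_⟩
    · intro K
      rw [PySem.Dict.get?_insert]
      split_ifs with hKeq
      · subst hKeq
        constructor
        · intro h; exact absurd h (by simp)
        · intro hall
          exact absurd rfl (hall (m : Int) (by omega) (by omega))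
      · rw [inv1 K]
        constructor
        · intro h k hk0' hk hkk
          rcases lt_or_eq_of_le (by omega : k ≤ (m : Int)) with hlt | rfl
          · exact h k hk0' (by omega) hkk
          · exact hKeq hkk.symm
        · intro h k hk0' hk hkk
          exact h k hk0' (by omega) hkk
    · intro K w v h
      rw [PySem.Dict.get?_insert] at h
      split_ifs at h with hKeq
      · injection h with h'
        injection h' with h1 h2
        subst h1; subst h2
        exact ⟨by omega, by omega, hKeq ▸ rfl, hGS.symm⟩
      · obtain ⟨a, b, c, d⟩ := inv2 K w v h
        exact ⟨a, by omega, c, d⟩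
    · intro x
      rw [inv3 x]
      constructor
      · rintro ⟨i, j, hi0, hij, hj, rfl⟩
        exact ⟨i, j, hi0, hij, by omega, rfl⟩
      · rintro ⟨i, j, hi0, hij, hj, rfl⟩
        refine ⟨i, j, hi0, hij, ?_, rfl⟩
        rcases lt_or_eq_of_le (by omega : j ≤ (m : Int)) with hlt | rfl
        · omega
        · exact absurd (hnopair_of_none hget i hi0 hij) (by simp)
  | some pv =>
    obtain ⟨w, v⟩ := pv
    obtain ⟨hw0, hwm, hwK, hv⟩ := inv2 _ w v hget
    have hmnext : pvNext sharks w = some ((m : Nat) : Int) := by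
      rw [pvNext_eq_some_iff]
      refine ⟨by omega, by omega, hwK.symm, ?_⟩
      intro t ht1 ht2 hkt
      exact pv_no_triple hpre hw0 (by omega) (by omega) (by omega) (by omega) (by omega)
        (by omega) (by omega) (by omega) hkt hwK.symm
    have honly : ∀ i : Int, 0 ≤ i → pvNext sharks i = some ((m : Nat) : Int) → i = w :=
      fun i hi0 hnext => pv_same_next hpre hi0 hw0 hnext hmnext
    have hszv : pvGetI v 4 = pvSzOf sharks w := by
      unfold pvSzOf pvGetI; rw [hv]
    have hinv1' : ∀ z : Int × List Int,
        (∀ K : Int × Int, (st.1.insert (pvKOf sharks (m : Int)) z).get? K = none ↔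
          ∀ k : Int, 0 ≤ k → k < ((m : Nat) + 1 : Nat) → pvKOf sharks k ≠ K) := by
      intro z K
      rw [PySem.Dict.get?_insert]
      split_ifs with hKeq
      · subst hKeq
        constructor
        · intro h; exact absurd h (by simp)
        · intro hall
          exact absurd rfl (hall (m : Int) (by omega) (by omega))
      · rw [inv1 K]
        constructor
        · intro h k hk0' hk hkk
          rcases lt_or_eq_of_le (by omega : k ≤ (m : Int)) with hlt | rfl
          · exact h k hk0' (by omega) hkk
          · exact hKeq hkk.symm
        · intro h k hk0' hk hkk
          exact h k hk0' (by omega) hkk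
    have hinv3' : ∀ (l : Int), pvLoser sharks w ((m : Nat) : Int) = l →
        ∀ x : Int, (PySem.Set.add st.2 l).contains x = true ↔
          ∃ i j : Int, 0 ≤ i ∧ pvNext sharks i = some j ∧ j < ((m : Nat) + 1 : Nat) ∧
            pvLoser sharks i j = x := by
      rintro l rfl x
      rw [PySem.Set.contains_iff, PySem.Set.mem_add, ← PySem.Set.contains_iff, inv3 x]
      constructor
      · rintro (⟨i, j, hi0, hij, hj, rfl⟩ | rfl)
        · exact ⟨i, j, hi0, hij, by omega, rfl⟩
        · exact ⟨w, (m : Int), hw0, hmnext, by omega, rfl⟩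
      · rintro ⟨i, j, hi0, hij, hj, rfl⟩
        rcases lt_or_eq_of_le (by omega : j ≤ (m : Int)) with hlt | rfl
        · exact Or.inl ⟨i, j, hi0, hij, by omega, rfl⟩
        · have : i = w := honly i hi0 hij
          subst this
          exact Or.inr rfl
    change pvInv sharks (m + 1)
      (if pvGetI v 4 > pvGetI sharks[m] 4 then
        (st.1.insert (pvKOf sharks (m : Int)) (w, v), st.2.add ((m : Nat) : Int))
      else
        (st.1.insert (pvKOf sharks (m : Int)) (((m : Nat) : Int), sharks[m]), st.2.add w))
    split_ifs with hsz
    · refine ⟨hinv1' (w, v), ?_, ?_⟩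
      · intro K w' v' h
        rw [PySem.Dict.get?_insert] at h
        split_ifs at h with hKeq
        · injection h with h'
          injection h' with h1 h2
          subst h1; subst h2
          exact ⟨hw0, by omega, hwK.trans hKeq.symm, hv⟩
        · obtain ⟨a, b, c, d⟩ := inv2 K w' v' h
          exact ⟨a, by omega, c, d⟩
      · have hlos : pvLoser sharks w ((m : Nat) : Int) = ((m : Nat) : Int) := by
          unfold pvLoser
          rw [if_pos]
          rw [← hszv]
          have : pvGetI sharks[m] 4 = pvSzOf sharks ((m : Nat) : Int) := by
            unfold pvSzOf pvGetI; rw [hGS]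
          rw [← this] at *
          exact hsz
        exact hinv3' _ hlos
    · refine ⟨hinv1' ((m : Int), sharks[m]), ?_, ?_⟩
      · intro K w' v' h
        rw [PySem.Dict.get?_insert] at h
        split_ifs at h with hKeq
        · injection h with h'
          injection h' with h1 h2
          subst h1; subst h2
          exact ⟨by omega, by omega, hKeq.symm, hGS.symm⟩
        · obtain ⟨a, b, c, d⟩ := inv2 K w' v' h
          exact ⟨a, by omega, c, d⟩
      · have hlos : pvLoser sharks w ((m : Nat) : Int) = w := by
          unfold pvLoser
          rw [if_neg]
          rw [← hszv]
          have : pvGetI sharks[m] 4 = pvSzOf sharks ((m : Nat) : Int) := by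
            unfold pvSzOf pvGetI; rw [hGS]
          rw [← this] at *
          exact hsz
        exact hinv3' _ hlos

theorem pv_bfold {sharks : List (List Int)} (hpre : Pre_eatShark sharks) :
    ∀ (n k : Nat) (st : PySem.Dict (Int × Int) (Int × List Int) × PySem.Set Int),
      sharks.length - k = n → k ≤ sharks.length → pvInv sharks k st →
      pvInv sharks sharks.length
        (((PySem.List.enumerate sharks 0).drop k).foldl pvStepB st) := by
  intro n
  induction n with
  | zero =>
    intro k st hnk hk hinv
    have hk' : k = sharks.length := by omega
    subst hk'
    rw [List.drop_eq_nil_of_le (by rw [PySem.List.length_enumerate])]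
    simpa using hinv
  | succ n ihn =>
    intro k st hnk hk hinv
    have hklt : k < sharks.length := by omega
    have hlen : k < (PySem.List.enumerate sharks 0).length := by
      rw [PySem.List.length_enumerate]; exact hklt
    rw [List.drop_eq_getElem_cons hlen, List.foldl_cons]
    have hel : (PySem.List.enumerate sharks 0)[k] = (((k : Nat) : Int), sharks[k]) := by
      rw [PySem.List.getElem_enumerate]
      simp
    rw [hel]
    exact ihn (k + 1) _ (by omega) (by omega) (pv_inv_step hpre hklt hinv)

theorem pv_B_eq {sharks : List (List Int)} (hpre : Pre_eatShark sharks) :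
    eatShark_alt sharks = pvResFilter sharks (fun x => (pvLosers sharks).contains x) := by
  have hinv : pvInv sharks sharks.length
      ((PySem.List.enumerate sharks 0).foldl pvStepB (PySem.Dict.empty, PySem.Set.empty)) := by
    have := pv_bfold hpre sharks.length 0
      (PySem.Dict.empty, PySem.Set.empty) (by omega) (by omega) (pv_inv_zero sharks)
    rwa [List.drop_zero] at this
  obtain ⟨-, -, inv3⟩ := hinv
  show ((PySem.List.enumerate sharks 0).filter
      (fun p => ! PySem.Set.contains
        ((PySem.List.enumerate sharks 0).foldl pvStepB (PySem.Dict.empty, PySem.Set.empty)).2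
        p.1)).map (·.2) = _
  unfold pvResFilter
  congr 1
  apply List.filter_congr
  intro p _
  congr 1
  rw [Bool.eq_iff_iff, inv3 p.1]
  rw [show ((pvLosers sharks).contains p.1 = true) ↔ p.1 ∈ pvLosers sharks from by
    simp, pv_mem_losers]
  constructor
  · rintro ⟨i, j, hi0, hij, -, heq⟩
    exact ⟨i, j, hi0, hij, heq⟩
  · rintro ⟨i, j, hi0, hij, heq⟩
    obtain ⟨-, h2, -, -⟩ := pvNext_eq_some_iff.mp hij
    exact ⟨i, j, hi0, hij, by omega, heq⟩

-- ===== VERDICT (by name: the statement is the Claim_ definition above) =====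
theorem eatShark_spec : Claim_equal_eatShark := by
  intro sharks _ hpre
  unfold Spec_eatShark
  rw [pv_A_eq hpre, pv_B_eq hpre]
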